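-- pv_equiv track=rewrite | github.com/kwkarlwang/Clothing-Prediction | as2.py | extract_review
-- ===== SOURCE A (Python) =====
-- def extract_review(data):
--     fit_reviews = [
--         d["review_text"] + " " + d["review_summary"] for d in data if d["fit"] == "fit"
--     ]
--     small_reviews = [
--         d["review_text"] + " " + d["review_summary"]
--         for d in data
--         if d["fit"] == "small"
--     ]
--     large_reviews = [
--         d["review_text"] + " " + d["review_summary"]
--         for d in data
--         if d["fit"] == "large"
--     ]
--     return fit_reviews, small_reviews, large_reviews
-- ===== SOURCE B (Python) =====
-- def extract_review(data):
--     fit_reviews = []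
--     small_reviews = []
--     large_reviews = []
--     for d in data:
--         fit = d["fit"]
--         if fit == "fit":
--             fit_reviews.append(d["review_text"] + " " + d["review_summary"])
--         elif fit == "small":
--             small_reviews.append(d["review_text"] + " " + d["review_summary"])
--         elif fit == "large":
--             large_reviews.append(d["review_text"] + " " + d["review_summary"])
--     return fit_reviews, small_reviews, large_reviews
-- ===== Notes on version B (the rewrite author's own statement) =====
-- stated objective: alternative
-- what changed: One dispatching pass with three accumulator lists replaces A's three separate filtering comprehensions over the data.
import Mathlib
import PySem

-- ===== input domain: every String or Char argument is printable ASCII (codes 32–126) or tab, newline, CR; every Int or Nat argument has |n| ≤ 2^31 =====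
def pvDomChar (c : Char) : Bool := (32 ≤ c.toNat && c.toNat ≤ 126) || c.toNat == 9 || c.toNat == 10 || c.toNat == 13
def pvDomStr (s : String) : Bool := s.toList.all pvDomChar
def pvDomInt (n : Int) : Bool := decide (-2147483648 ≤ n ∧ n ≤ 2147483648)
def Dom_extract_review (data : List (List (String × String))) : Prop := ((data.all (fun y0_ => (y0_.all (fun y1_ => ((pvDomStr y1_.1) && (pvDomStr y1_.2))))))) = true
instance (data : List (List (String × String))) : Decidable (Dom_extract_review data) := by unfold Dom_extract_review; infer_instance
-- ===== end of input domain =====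

-- B replaces A's three filtering comprehensions by one dispatching pass over the data (alternative decomposition).


-- ===== PORT A =====
-- d[k] for a Python dict given as an association list: first match; under Pre_ every
-- lookup A performs is some, so the "" default is never the computed value.
def pyLookA (d : List (String × String)) (k : String) : String :=
  ((d.find? (fun p => p.1 == k)).map Prod.snd).getD ""

def extract_review (data : List (List (String × String))) : List String × List String × List String :=
  let fit_reviews := data.filterMap (fun d =>
    if pyLookA d "fit" == "fit" then some (pyLookA d "review_text" ++ " " ++ pyLookA d "review_summary") else none)
  let small_reviews := data.filterMap (fun d =>
    if pyLookA d "fit" == "small" then some (pyLookA d "review_text" ++ " " ++ pyLookA d "review_summary") else none)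
  let large_reviews := data.filterMap (fun d =>
    if pyLookA d "fit" == "large" then some (pyLookA d "review_text" ++ " " ++ pyLookA d "review_summary") else none)
  (fit_reviews, small_reviews, large_reviews)

-- ===== PORT B =====
def pyLookB (d : List (String × String)) (k : String) : String :=
  ((d.find? (fun p => p.1 == k)).map Prod.snd).getD ""

-- the body of B's single loop: dispatch d to the list chosen by its "fit" value
def stepB (acc : List String × List String × List String) (d : List (String × String)) :
    List String × List String × List String :=
  let fit := pyLookB d "fit"
  if fit == "fit" then
    (acc.1 ++ [pyLookB d "review_text" ++ " " ++ pyLookB d "review_summary"], acc.2.1, acc.2.2)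
  else if fit == "small" then
    (acc.1, acc.2.1 ++ [pyLookB d "review_text" ++ " " ++ pyLookB d "review_summary"], acc.2.2)
  else if fit == "large" then
    (acc.1, acc.2.1, acc.2.2 ++ [pyLookB d "review_text" ++ " " ++ pyLookB d "review_summary"])
  else acc

def extract_review_alt (data : List (List (String × String))) : List String × List String × List String :=
  data.foldl stepB ([], [], [])

-- ===== PRECONDITION & SPEC =====
-- Pre_ excludes exactly the inputs on which the Python A raises KeyError: a row without
-- a "fit" key, or a row whose fit is one of the three categories but lacks
-- "review_text" or "review_summary".
def Pre_extract_review (data : List (List (String × String))) : Prop :=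
  ∀ d ∈ data, (d.find? (fun p => p.1 == "fit")).isSome ∧
    ((((d.find? (fun p => p.1 == "fit")).map Prod.snd).getD "" = "fit" ∨
      ((d.find? (fun p => p.1 == "fit")).map Prod.snd).getD "" = "small" ∨
      ((d.find? (fun p => p.1 == "fit")).map Prod.snd).getD "" = "large") →
      (d.find? (fun p => p.1 == "review_text")).isSome ∧
      (d.find? (fun p => p.1 == "review_summary")).isSome)
instance (data : List (List (String × String))) : Decidable (Pre_extract_review data) := by unfold Pre_extract_review; infer_instance
def pvWitness_extract_review : (List (List (String × String))) :=
  [[("fit", "fit"), ("review_text", "good"), ("review_summary", "ok")], [("fit", "huge")]]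

def Spec_extract_review (data : List (List (String × String))) (out : List String × List String × List String) : Prop := out = extract_review_alt data
instance (data : List (List (String × String))) (out : List String × List String × List String) : Decidable (Spec_extract_review data out) := by unfold Spec_extract_review; infer_instance

-- ===== CLAIM (what is proved, stated in full; the proofs are below) =====
def Claim_equal_extract_review : Prop := ∀ (data : List (List (String × String))), Dom_extract_review data → Pre_extract_review data → Spec_extract_review data (extract_review data)

-- ===== LEMMAS AND PROOFS =====
theorem pyLookA_eq : pyLookA = pyLookB := rfl

-- loop invariant: B's fold, started from any accumulator, appends exactly A's three filters
theorem foldl_stepB (data : List (List (String × String))) (f s l : List String) :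
    data.foldl stepB (f, s, l) =
    (f ++ data.filterMap (fun d =>
        if pyLookB d "fit" == "fit" then some (pyLookB d "review_text" ++ " " ++ pyLookB d "review_summary") else none),
     s ++ data.filterMap (fun d =>
        if pyLookB d "fit" == "small" then some (pyLookB d "review_text" ++ " " ++ pyLookB d "review_summary") else none),
     l ++ data.filterMap (fun d =>
        if pyLookB d "fit" == "large" then some (pyLookB d "review_text" ++ " " ++ pyLookB d "review_summary") else none)) := by
  induction data generalizing f s l with
  | nil => simp
  | cons d rest ih =>
    rw [List.foldl_cons]
    by_cases h1 : pyLookB d "fit" = "fit"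
    · have hs : stepB (f, s, l) d =
          (f ++ [pyLookB d "review_text" ++ " " ++ pyLookB d "review_summary"], s, l) := by
        simp [stepB, h1]
      rw [hs, ih]
      simp [h1]
    · by_cases h2 : pyLookB d "fit" = "small"
      · have hs : stepB (f, s, l) d =
            (f, s ++ [pyLookB d "review_text" ++ " " ++ pyLookB d "review_summary"], l) := by
          simp [stepB, h2]
        rw [hs, ih]
        simp [h1, h2]
      · by_cases h3 : pyLookB d "fit" = "large"
        · have hs : stepB (f, s, l) d =
              (f, s, l ++ [pyLookB d "review_text" ++ " " ++ pyLookB d "review_summary"]) := by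
            simp [stepB, h3]
          rw [hs, ih]
          simp [h1, h2, h3]
        · have hs : stepB (f, s, l) d = (f, s, l) := by
            simp [stepB, h1, h2, h3]
          rw [hs, ih]
          simp [h1, h2, h3]

-- ===== VERDICT (by name: the statement is the Claim_ definition above) =====
theorem extract_review_spec : Claim_equal_extract_review := by
  intro data _ _
  unfold Spec_extract_review extract_review extract_review_alt
  rw [foldl_stepB]
  simp [pyLookA_eq]
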